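-- pv_equiv track=rewrite | github.com/SelvorWhim/competitive | Codewars/DoubleCola.py | whoIsNext
-- ===== SOURCE A (Python) =====
-- def whoIsNext(names, n):
--     power = 1
--     k = len(names)
--     cycle_len = k
--     while n > cycle_len:
--         n -= cycle_len
--         power *= 2
--         cycle_len = k * power
--     i = (n-1) // power
--     return names[i]
-- ===== SOURCE B (Python) =====
-- def whoIsNext(names, n):
--     k = len(names)
--     p = ((n - 1) // k + 1).bit_length() - 1
--     return names[(n - 1 - k * (2 ** p - 1)) >> p]
-- ===== Notes on version B (the rewrite author's own statement) =====
-- stated objective: simpler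
-- what changed: Replaced A's doubling while-loop with a closed form: the round's power of two is read off ((n-1)//k + 1).bit_length() - 1 and the index computed directly by one shift.
-- outside the precondition, e.g. on whoIsNext(['a', 'b'], 0): A returns 'b', B raises TypeError; on whoIsNext(['a', 'b'], -5): A raises IndexError, B raises IndexError
import Mathlib
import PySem

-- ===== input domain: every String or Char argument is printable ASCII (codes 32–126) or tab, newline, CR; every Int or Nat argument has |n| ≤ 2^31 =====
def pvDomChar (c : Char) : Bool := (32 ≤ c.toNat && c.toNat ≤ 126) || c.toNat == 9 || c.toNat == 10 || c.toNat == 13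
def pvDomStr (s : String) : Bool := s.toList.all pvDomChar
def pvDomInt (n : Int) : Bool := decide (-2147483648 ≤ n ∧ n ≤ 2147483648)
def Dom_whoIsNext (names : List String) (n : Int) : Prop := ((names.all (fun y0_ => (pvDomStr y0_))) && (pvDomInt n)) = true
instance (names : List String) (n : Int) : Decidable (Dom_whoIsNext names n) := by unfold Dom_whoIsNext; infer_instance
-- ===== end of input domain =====

-- B replaces A's doubling loop by a closed form: the doubling power is read off with bit_length and the index computed directly (objective: simpler).

-- ===== PORT A =====
-- A's while loop; the extra '0 < cycle_len' conjunct only totalizes the recursion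
-- (when cycle_len ≤ 0 and n > cycle_len the Python loop never terminates; such inputs are outside Pre_).
def whoIsNextLoop (k : Int) (n : Int) (power : Int) (cycle_len : Int) : Int × Int :=
  if h : cycle_len < n ∧ 0 < cycle_len then
    whoIsNextLoop k (n - cycle_len) (power * 2) (k * (power * 2))
  else (n, power)
termination_by n.toNat
decreasing_by omega

def whoIsNext (names : List String) (n : Int) : String :=
  let k : Int := names.length
  let r := whoIsNextLoop k n 1 k
  let i := PySem.Int.floordiv (r.1 - 1) r.2
  (PySem.List.pyGet? names i).getD ""

-- ===== PORT B =====
def whoIsNext_alt (names : List String) (n : Int) : String :=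
  let k : Int := names.length
  let p : Int := (PySem.Int.bitLength (PySem.Int.floordiv (n - 1) k + 1) : Int) - 1
  (PySem.List.pyGet? names ((n - 1 - k * (2 ^ p.toNat - 1)) >>> p.toNat)).getD ""

-- ===== PRECONDITION & SPEC =====
-- Pre_ excludes empty 'names' (A diverges or raises IndexError) and n ≤ 0, where A either raises
-- IndexError or returns a value by Python's negative-index wraparound — an artefact of A's
-- implementation on which B's arithmetic raises instead.
def Pre_whoIsNext (names : List String) (n : Int) : Prop := names ≠ [] ∧ 1 ≤ n
instance (names : List String) (n : Int) : Decidable (Pre_whoIsNext names n) := by unfold Pre_whoIsNext; infer_instance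

def pvWitness_whoIsNext : List String × Int := (["Sheldon", "Leonard"], 7)

def Spec_whoIsNext (names : List String) (n : Int) (out : String) : Prop := out = whoIsNext_alt names n
instance (names : List String) (n : Int) (out : String) : Decidable (Spec_whoIsNext names n out) := by unfold Spec_whoIsNext; infer_instance

-- ===== CLAIM (what is proved, stated in full; the proofs are below) =====
def Claim_equal_whoIsNext : Prop := ∀ (names : List String) (n : Int), Dom_whoIsNext names n → Pre_whoIsNext names n → Spec_whoIsNext names n (whoIsNext names n)

-- ===== LEMMAS AND PROOFS =====

-- The loop invariant: starting from power = 2^j, the loop returns (n', 2^m) with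
-- n' = n - k·(2^m - 2^j) and 1 ≤ n' ≤ k·2^m.
lemma whoIsNextLoop_spec (k : Int) (hk : 1 ≤ k) :
    ∀ (t : Nat) (n : Int), n.toNat ≤ t → 1 ≤ n → ∀ (j : Nat),
      ∃ m : Nat, j ≤ m ∧
        whoIsNextLoop k n ((2:Int)^j) (k * (2:Int)^j) = (n - k * ((2:Int)^m - (2:Int)^j), (2:Int)^m) ∧
        1 ≤ n - k * ((2:Int)^m - (2:Int)^j) ∧ n - k * ((2:Int)^m - (2:Int)^j) ≤ k * (2:Int)^m := by
  intro t
  induction t with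
  | zero => intro n hle hn j; omega
  | succ t ih =>
    intro n hle hn j
    have hpow : (1:Int) ≤ 2^j := one_le_pow₀ (by norm_num)
    have hcyc : 1 ≤ k * 2^j := by nlinarith
    by_cases hc : k * 2^j < n
    · rw [whoIsNextLoop]
      have hcond : k * 2^j < n ∧ 0 < k * 2^j := ⟨hc, by omega⟩
      rw [dif_pos hcond]
      have hstep : (2:Int)^j * 2 = 2^(j+1) := by ring
      obtain ⟨m, hjm, heq, h1, h2⟩ := ih (n - k * 2^j) (by omega) (by omega) (j+1)
      refine ⟨m, by omega, ?_, by nlinarith [h1], by nlinarith [h2]⟩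
      rw [hstep, heq]
      exact Prod.ext (by ring) rfl
    · exact ⟨j, le_refl j, by rw [whoIsNextLoop, dif_neg (by omega)]; exact Prod.ext (by ring) rfl, by constructor <;> nlinarith [not_lt.mp hc]⟩

lemma bitLength_of_between (q : Int) (m : Nat) (h1 : (2:Int)^m ≤ q) (h2 : q < 2^(m+1)) :
    PySem.Int.bitLength q = m + 1 := by
  have hq0 : (0:Int) < q := lt_of_lt_of_le (by positivity) h1
  have hqn : q ≠ 0 := by omega
  have hcast : (q.natAbs : Int) = q := Int.natAbs_of_nonneg (by omega)
  have hn1 : 2^m ≤ q.natAbs := by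
    have : ((2^m : Nat) : Int) ≤ (q.natAbs : Int) := by rw [hcast]; push_cast; exact h1
    exact_mod_cast this
  have hn2 : q.natAbs < 2^(m+1) := by
    have : (q.natAbs : Int) < ((2^(m+1) : Nat) : Int) := by rw [hcast]; push_cast; exact h2
    exact_mod_cast this
  have hA := PySem.Int.two_pow_bitLength_le q hqn
  have hB := PySem.Int.lt_two_pow_bitLength q
  set bl := PySem.Int.bitLength q with hbl
  by_contra hne
  rcases Nat.lt_or_ge bl (m+1) with h | h
  · have : (2:Nat)^bl ≤ 2^m := Nat.pow_le_pow_right (by norm_num) (by omega)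
    omega
  · have hge : m + 1 ≤ bl - 1 := by omega
    have : (2:Nat)^(m+1) ≤ 2^(bl-1) := Nat.pow_le_pow_right (by norm_num) hge
    omega

lemma shiftRight_eq_floordiv (x : Int) (m : Nat) (hx : 0 ≤ x) :
    x >>> m = PySem.Int.floordiv x ((2:Int)^m) := by
  obtain ⟨a, rfl⟩ := Int.eq_ofNat_of_zero_le hx
  rw [PySem.Int.floordiv_eq_ediv_of_pos (by positivity)]
  simp [Int.shiftRight_eq_div_pow]

-- ===== VERDICT (by name: the statement is the Claim_ definition above) =====
theorem whoIsNext_spec : Claim_equal_whoIsNext := by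
  intro names n _ hpre
  obtain ⟨hne, hn⟩ := hpre
  unfold Spec_whoIsNext whoIsNext whoIsNext_alt
  set k : Int := (names.length : Int) with hkdef
  have hk : 1 ≤ k := by
    have : names.length ≠ 0 := by simpa using hne
    omega
  obtain ⟨m, _, heq, h1, h2⟩ := whoIsNextLoop_spec k hk n.toNat n (le_refl _) hn 0
  simp only [pow_zero, mul_one] at heq h1 h2
  -- the value of q = (n-1)//k + 1 lies in [2^m, 2^(m+1))
  have hq1 : (2:Int)^m ≤ PySem.Int.floordiv (n-1) k + 1 := by
    have : (2:Int)^m - 1 ≤ PySem.Int.floordiv (n-1) k := by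
      rw [PySem.Int.le_floordiv_iff_mul_le (by omega)]; nlinarith
    omega
  have hq2 : PySem.Int.floordiv (n-1) k + 1 < (2:Int)^(m+1) := by
    have : PySem.Int.floordiv (n-1) k < (2:Int)^(m+1) - 1 := by
      rw [PySem.Int.floordiv_lt_iff_lt_mul (by omega)]
      have : (2:Int)^(m+1) = 2 * 2^m := by ring
      nlinarith
    omega
  have hbl := bitLength_of_between _ m hq1 hq2
  show (PySem.List.pyGet? names (PySem.Int.floordiv ((whoIsNextLoop k n 1 k).1 - 1) (whoIsNextLoop k n 1 k).2)).getD "" =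
    (PySem.List.pyGet? names ((n - 1 - k * (2 ^ (((PySem.Int.bitLength (PySem.Int.floordiv (n - 1) k + 1) : Int) - 1).toNat) - 1)) >>> (((PySem.Int.bitLength (PySem.Int.floordiv (n - 1) k + 1) : Int) - 1).toNat))).getD ""
  rw [heq, hbl]
  have hptoNat : ((((m:Int) + 1) - 1)).toNat = m := by omega
  have hcastp : ((m + 1 : Nat) : Int) - 1 = (m:Int) + 1 - 1 := by push_cast; ring
  rw [hcastp, hptoNat]
  have hnum : n - 1 - k * ((2:Int)^m - 1) = (n - k * ((2:Int)^m - 1)) - 1 := by ring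
  rw [hnum, shiftRight_eq_floordiv _ m (by omega)]
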